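-- pv_equiv track=rewrite | github.com/EricYJA/KG_cash | datasets/WebQSP_KG/build_webqsp_subkg.py | merge_entity_name_maps
-- ===== SOURCE A (Python) =====
-- def merge_entity_name_maps(
--     *entity_name_maps: dict[str, dict[str, set[str]]],
-- ) -> dict[str, dict[str, set[str]]]:
--     """Merge multiple entity-name maps into one deterministic mapping."""
--
--     merged: dict[str, dict[str, set[str]]] = {}
--     for entity_name_map in entity_name_maps:
--         for entity_id, names in entity_name_map.items():
--             target = merged.setdefault(entity_id, {})
--             for name, sources in names.items():
--                 target.setdefault(name, set()).update(sources)
--     return merged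
-- ===== SOURCE B (Python) =====
-- def merge_entity_name_maps(
--     *entity_name_maps: dict[str, dict[str, set[str]]],
-- ) -> dict[str, dict[str, set[str]]]:
--     """Merge multiple entity-name maps into one deterministic mapping.
--
--     Dedup-and-scan strategy: flatten all maps to (entity_id, names) pairs, then
--     use one generic group-reduce helper at both levels: list the distinct keys
--     (first appearance, via dict.fromkeys) and for each key scan all pairs,
--     folding the matching payloads with a combine function. Input sets are never
--     mutated (fresh unions only)."""
--     pairs = [item for m in entity_name_maps for item in m.items()]
--     grouped = _group_reduce(pairs, [], lambda acc, names: acc + list(names.items()))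
--     return {eid: _group_reduce(name_pairs, set(), lambda s, srcs: s | set(srcs))
--             for eid, name_pairs in grouped.items()}
--
--
-- def _group_reduce(pairs, init, combine):
--     out = {}
--     for key in dict.fromkeys(k for k, _ in pairs):
--         acc = init
--         for k, v in pairs:
--             if k == key:
--                 acc = combine(acc, v)
--         out[key] = acc
--     return out
-- ===== Notes on version B (the rewrite author's own statement) =====
-- stated objective: alternative
-- what changed: Instead of building the nested result incrementally by two-level setdefault mutation in one pass, B lists the distinct keys first (dict.fromkeys) and, via one generic group-reduce helper applied at both nesting levels, rescans the pairs per key to fold the matching payloads (concatenating name items at the outer level, unioning fresh sets at the inner level).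
import Mathlib
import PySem

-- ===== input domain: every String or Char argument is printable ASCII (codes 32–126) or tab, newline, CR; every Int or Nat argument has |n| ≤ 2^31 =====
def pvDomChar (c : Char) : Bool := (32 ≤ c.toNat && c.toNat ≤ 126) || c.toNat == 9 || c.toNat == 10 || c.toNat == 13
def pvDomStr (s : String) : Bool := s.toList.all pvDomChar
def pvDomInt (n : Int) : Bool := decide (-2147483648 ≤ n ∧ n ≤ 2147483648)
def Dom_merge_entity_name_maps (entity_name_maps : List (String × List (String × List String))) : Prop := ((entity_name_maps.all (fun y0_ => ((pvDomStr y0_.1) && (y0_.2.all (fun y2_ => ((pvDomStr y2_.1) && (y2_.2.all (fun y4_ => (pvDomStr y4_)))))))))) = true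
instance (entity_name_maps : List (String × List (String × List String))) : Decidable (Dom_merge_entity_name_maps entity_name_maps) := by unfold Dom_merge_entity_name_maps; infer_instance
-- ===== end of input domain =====

-- B replaces A's one-pass incremental two-level setdefault mutation by a generic
-- dedup-keys-then-rescan group-reduce applied at both nesting levels (objective: alternative);
-- return-value equivalence only.

-- ===== PORT A =====
-- inner loop: 'for name, sources in names.items(): target.setdefault(name, set()).update(sources)'
-- (setdefault+in-place update net effect = overwrite-in-place/append insert of the updated set)
def pvInnerA (target : PySem.Dict String (PySem.Set String)) (names : List (String × List String)) :
    PySem.Dict String (PySem.Set String) :=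
  names.foldl (fun t q => t.insert q.1 (PySem.Set.update (t.getD q.1 PySem.Set.empty) q.2)) target

-- body of 'for entity_id, names in entity_name_map.items(): target = merged.setdefault(entity_id, {}); …'
-- (alias mutation of target = re-insert of the final target at entity_id's position)
def pvStepA (merged : PySem.Dict String (PySem.Dict String (PySem.Set String)))
    (p : String × List (String × List String)) :
    PySem.Dict String (PySem.Dict String (PySem.Set String)) :=
  merged.insert p.1 (pvInnerA (merged.getD p.1 PySem.Dict.empty) p.2)

-- the Lean argument models a single map, so the Python variadic outer loop runs once over it
def merge_entity_name_maps (entity_name_maps : List (String × List (String × List String))) :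
    List (String × List (String × List String)) :=
  let merged := entity_name_maps.foldl pvStepA PySem.Dict.empty
  merged.items.map (fun p => (p.1, p.2.items))

-- ===== PORT B =====
-- helper _group_reduce: 'for key in dict.fromkeys(k for k, _ in pairs): acc = init;
--  for k, v in pairs: if k == key: acc = combine(acc, v); out[key] = acc'
def pvGroupReduce {α β : Type} (pairs : List (String × α)) (init : β) (combine : β → α → β) :
    PySem.Dict String β :=
  (PySem.List.dedup (pairs.map Prod.fst)).foldl
    (fun out key =>
      out.insert key (pairs.foldl (fun acc q => if q.1 == key then combine acc q.2 else acc) init))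
    PySem.Dict.empty

def merge_entity_name_maps_alt (entity_name_maps : List (String × List (String × List String))) :
    List (String × List (String × List String)) :=
  -- the flattening comprehension over the single map's items is the list itself
  let pairs := entity_name_maps
  let grouped := pvGroupReduce pairs ([] : List (String × List String)) (fun acc names => acc ++ names)
  -- '{eid: _group_reduce(name_pairs, set(), lambda s, srcs: s | set(srcs)) for …}'
  grouped.items.map (fun p =>
    (p.1, (pvGroupReduce p.2 PySem.Set.empty (fun s srcs => PySem.Set.union s srcs)).items))

-- ===== PRECONDITION & SPEC =====
def Spec_merge_entity_name_maps (entity_name_maps : List (String × List (String × List String))) (out : List (String × List (String × List String))) : Prop := out = merge_entity_name_maps_alt entity_name_maps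
instance (entity_name_maps : List (String × List (String × List String))) (out : List (String × List (String × List String))) : Decidable (Spec_merge_entity_name_maps entity_name_maps out) := by unfold Spec_merge_entity_name_maps; infer_instance

-- ===== CLAIM (what is proved, stated in full; the proofs are below) =====
def Claim_equal_merge_entity_name_maps : Prop := ∀ (entity_name_maps : List (String × List (String × List String))), Dom_merge_entity_name_maps entity_name_maps → Spec_merge_entity_name_maps entity_name_maps (merge_entity_name_maps entity_name_maps)

-- ===== LEMMAS AND PROOFS =====

-- the per-key value of an A-shaped insert/getD fold, as a single rescan of the pairs
def pvVal {α β : Type} (g : β → α → β) (init : β) (L : List (String × α)) (k : String) : β :=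
  L.foldl (fun acc q => if q.1 == k then g acc q.2 else acc) init

theorem pvVal_append_singleton {α β : Type} (g : β → α → β) (init : β)
    (M : List (String × α)) (p : String × α) (k : String) :
    pvVal g init (M ++ [p]) k = if p.1 == k then g (pvVal g init M k) p.2 else pvVal g init M k := by
  simp [pvVal, List.foldl_append]

theorem pvVal_of_not_mem {α β : Type} (g : β → α → β) (init : β)
    (M : List (String × α)) (k : String) (h : k ∉ M.map Prod.fst) :
    pvVal g init M k = init := by
  have hfilter : M.filter (fun q => q.1 == k) = [] := by
    rw [List.filter_eq_nil_iff]
    intro q hq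
    simp only [beq_iff_eq]
    intro hk
    exact h (List.mem_map.mpr ⟨q, hq, hk⟩)
  have := @List.foldl_filter (String × α) β (fun q => q.1 == k)
    (fun acc q => g acc q.2) M init
  rw [hfilter] at this
  simpa [pvVal] using this.symm

-- characterisation of A's insert/getD accumulation loop: items = first-appearance keys,
-- each paired with the rescan fold pvVal
theorem pvAchar {α β : Type} (g : β → α → β) (init : β) (L : List (String × α)) :
    (L.foldl (fun d p => d.insert p.1 (g (d.getD p.1 init) p.2)) PySem.Dict.empty).items
      = (PySem.Set.ofList (L.map Prod.fst)).map (fun k => (k, pvVal g init L k)) := by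
  induction L using List.reverseRecOn with
  | nil => rfl
  | append_singleton M p ih =>
    rw [List.foldl_append, List.foldl_cons, List.foldl_nil]
    set D := M.foldl (fun d p => d.insert p.1 (g (d.getD p.1 init) p.2)) PySem.Dict.empty with hD
    have hkeys : D.keys = PySem.Set.ofList (M.map Prod.fst) := by
      simp only [PySem.Dict.keys, ih, List.map_map, Function.comp_def]
      exact List.map_id' _
    have hnodup : D.keys.Nodup := by rw [hkeys]; exact PySem.Set.nodup_ofList _
    rw [List.map_append]
    simp only [List.map_cons, List.map_nil]
    rw [PySem.Set.ofList_append_singleton]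
    by_cases hmem : p.1 ∈ M.map Prod.fst
    · have hmem' : p.1 ∈ PySem.Set.ofList (M.map Prod.fst) := (PySem.Set.mem_ofList _ _).mpr hmem
      have hcont : D.contains p.1 = true := by
        rw [PySem.Dict.contains_eq_decide_mem_keys, hkeys]; simpa using hmem'
      have hgetD : D.getD p.1 init = pvVal g init M p.1 := by
        apply PySem.Dict.getD_of_mem_items D _ hnodup
        rw [ih]
        exact List.mem_map.mpr ⟨p.1, hmem', rfl⟩
      rw [PySem.Dict.items_insert_of_contains _ _ hcont, ih, hgetD,
        PySem.Set.add_of_mem hmem', List.map_map]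
      apply List.map_congr_left
      intro k hk
      by_cases hkp : k = p.1
      · subst hkp
        simp [pvVal_append_singleton]
      · have h2 : (p.1 == k) = false := by simp [Ne.symm hkp]
        simp [pvVal_append_singleton, h2, hkp]
    · have hmem' : p.1 ∉ PySem.Set.ofList (M.map Prod.fst) := fun h =>
        hmem ((PySem.Set.mem_ofList _ _).mp h)
      have hcont : D.contains p.1 = false := by
        rw [PySem.Dict.contains_eq_decide_mem_keys, hkeys]; simpa using hmem'
      have hgetD : D.getD p.1 init = init := PySem.Dict.getD_of_not_contains _ _ hcont
      rw [PySem.Dict.items_insert_of_not_contains _ _ hcont, ih, hgetD,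
        PySem.Set.add_of_not_mem hmem', List.map_append]
      congr 1
      · apply List.map_congr_left
        intro k hk
        have hkp : p.1 ≠ k := fun h => hmem' (h ▸ hk)
        simp [pvVal_append_singleton, hkp]
      · show _ = [(p.1, pvVal g init (M ++ [p]) p.1)]
        rw [pvVal_append_singleton, pvVal_of_not_mem g init M p.1 hmem]
        simp

-- B's group-reduce loop inserts fresh distinct keys, so its items list is literally the map
theorem pvGR_items {α β : Type} (pairs : List (String × α)) (init : β) (combine : β → α → β) :
    (pvGroupReduce pairs init combine).items
      = (PySem.List.dedup (pairs.map Prod.fst)).map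
          (fun k => (k, pvVal combine init pairs k)) := by
  unfold pvGroupReduce
  have h := PySem.Dict.items_foldl_insert_fresh (PySem.List.dedup (pairs.map Prod.fst)) id
    (fun key => pairs.foldl (fun acc q => if q.1 == key then combine acc q.2 else acc) init)
    PySem.Dict.empty (fun a _ => PySem.Dict.contains_empty a)
    (by rw [PySem.List.dedup_eq_ofList]; simp [PySem.Set.nodup_ofList])
  simp only [pvVal]
  simpa using h

-- folding element-wise through the payloads selected by key = folding through their concatenation
theorem pvFold_concat {β γ : Type} (f : γ → β → γ) (k : String) :
    ∀ (L : List (String × List β)) (cs : List β) (d : γ),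
      (L.foldl (fun acc q => if q.1 == k then acc ++ q.2 else acc) cs).foldl f d
        = L.foldl (fun acc q => if q.1 == k then q.2.foldl f acc else acc) (cs.foldl f d) := by
  intro L
  induction L with
  | nil => intro cs d; rfl
  | cons q L ih =>
    intro cs d
    simp only [List.foldl_cons]
    by_cases h : (q.1 == k) = true
    · simp only [h, if_true, List.foldl_append, ih (cs ++ q.2) d]
    · simp only [Bool.not_eq_true] at h
      simp only [h, Bool.false_eq_true, if_false, ih cs d]

-- the two per-entity values have the same items list
theorem pvPerEntity (L : List (String × List (String × List String))) (k : String) :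
    (pvVal pvInnerA PySem.Dict.empty L k).items
      = (pvGroupReduce (pvVal (fun acc names => acc ++ names) [] L k) PySem.Set.empty
          (fun s srcs => PySem.Set.union s srcs)).items := by
  have h1 : pvVal pvInnerA PySem.Dict.empty L k
      = (pvVal (fun acc names => acc ++ names) [] L k).foldl
          (fun t q => t.insert q.1 (PySem.Set.update (t.getD q.1 PySem.Set.empty) q.2))
          PySem.Dict.empty := by
    unfold pvVal pvInnerA
    rw [pvFold_concat]
    rfl
  rw [h1, pvAchar, pvGR_items, PySem.List.dedup_eq_ofList]
  rfl

-- ===== VERDICT (by name: the statement is the Claim_ definition above) =====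
theorem merge_entity_name_maps_spec : Claim_equal_merge_entity_name_maps := by
  intro L _
  unfold Spec_merge_entity_name_maps merge_entity_name_maps merge_entity_name_maps_alt
  simp only
  have hA : L.foldl pvStepA PySem.Dict.empty
      = L.foldl (fun d p => d.insert p.1 (pvInnerA (d.getD p.1 PySem.Dict.empty) p.2))
          PySem.Dict.empty := rfl
  rw [hA, pvAchar pvInnerA PySem.Dict.empty L, pvGR_items, PySem.List.dedup_eq_ofList,
    List.map_map, List.map_map]
  apply List.map_congr_left
  intro k _
  simp [pvPerEntity L k]
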